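-- pv_equiv track=rewrite | github.com/HuffleFlux/EDHCubeGenerator | 3JumpstartLandAdder.py | select_basic_lands
-- ===== SOURCE A (Python) =====
-- color_order = ["W", "U", "B", "R", "G"]
--
-- basic_lands = {
--     "W": "Plains", "U": "Island", "B": "Swamp", "R": "Mountain", "G": "Forest"
-- }
--
-- def select_basic_lands(color_identity):
--     color_list = [c for c in color_order if c in color_identity]  # Sort in W, U, B, R, G order
--
--     if len(color_list) == 1:
--         return [basic_lands[color_list[0]]] * 15
--     elif len(color_list) == 2:
--         return [basic_lands[color_list[0]]] * 8 + [basic_lands[color_list[1]]] * 7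
--     elif len(color_list) == 3:
--         return [basic_lands[color_list[0]]] * 5 + [basic_lands[color_list[1]]] * 5 + [basic_lands[color_list[2]]] * 5
--     elif len(color_list) == 4:
--         return [basic_lands[color_list[0]]] * 4 + [basic_lands[color_list[1]]] * 4 + [basic_lands[color_list[2]]] * 4 + [basic_lands[color_list[3]]] * 3
--     return ["Basic land selection failed."]
-- ===== SOURCE B (Python) =====
-- color_order = ["W", "U", "B", "R", "G"]
--
-- basic_lands = {
--     "W": "Plains", "U": "Island", "B": "Swamp", "R": "Mountain", "G": "Forest"
-- }
--
-- def select_basic_lands(color_identity):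
--     color_list = [c for c in color_order if c in color_identity]
--     n = len(color_list)
--     if not 1 <= n <= 4:
--         return ["Basic land selection failed."]
--     base, rem = divmod(15, n)
--     return [land
--             for i, c in enumerate(color_list)
--             for land in [basic_lands[c]] * (base + (1 if i < rem else 0))]
-- ===== Notes on version B (the rewrite author's own statement) =====
-- stated objective: simpler
-- what changed: Replaces the four hardcoded per-count branches with one divmod(15,n) distribution loop (front colors get the remainder), built by a single enumerate-based flatten.
import Mathlib
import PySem

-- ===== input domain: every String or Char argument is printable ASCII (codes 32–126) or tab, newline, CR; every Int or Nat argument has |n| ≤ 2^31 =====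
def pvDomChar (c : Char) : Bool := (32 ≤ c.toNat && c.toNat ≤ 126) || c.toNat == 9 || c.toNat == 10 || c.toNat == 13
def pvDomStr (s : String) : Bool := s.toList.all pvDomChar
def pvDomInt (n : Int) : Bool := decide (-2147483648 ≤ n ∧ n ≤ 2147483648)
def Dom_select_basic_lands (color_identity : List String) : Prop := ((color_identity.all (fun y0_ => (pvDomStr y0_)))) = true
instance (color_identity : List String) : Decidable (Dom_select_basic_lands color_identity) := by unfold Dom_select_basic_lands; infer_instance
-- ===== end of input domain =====

-- B: one divmod(15,n) distribution loop instead of four hardcoded count branches (simpler; same cost).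

-- ===== PORT A =====
def color_order : List String := ["W", "U", "B", "R", "G"]

def basic_lands : PySem.Dict String String :=
  PySem.Dict.ofList [("W", "Plains"), ("U", "Island"), ("B", "Swamp"), ("R", "Mountain"), ("G", "Forest")]

-- A's if/elif chain on the filtered color list; cl[i] is in range in every taken
-- branch, so the pyGet? default "" is never used.
def aBody (cl : List String) : List String :=
  if cl.length = 1 then
    List.replicate 15 (PySem.Dict.getD basic_lands ((PySem.List.pyGet? cl 0).getD "") "")
  else if cl.length = 2 then
    List.replicate 8 (PySem.Dict.getD basic_lands ((PySem.List.pyGet? cl 0).getD "") "") ++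
    List.replicate 7 (PySem.Dict.getD basic_lands ((PySem.List.pyGet? cl 1).getD "") "")
  else if cl.length = 3 then
    List.replicate 5 (PySem.Dict.getD basic_lands ((PySem.List.pyGet? cl 0).getD "") "") ++
    List.replicate 5 (PySem.Dict.getD basic_lands ((PySem.List.pyGet? cl 1).getD "") "") ++
    List.replicate 5 (PySem.Dict.getD basic_lands ((PySem.List.pyGet? cl 2).getD "") "")
  else if cl.length = 4 then
    List.replicate 4 (PySem.Dict.getD basic_lands ((PySem.List.pyGet? cl 0).getD "") "") ++
    List.replicate 4 (PySem.Dict.getD basic_lands ((PySem.List.pyGet? cl 1).getD "") "") ++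
    List.replicate 4 (PySem.Dict.getD basic_lands ((PySem.List.pyGet? cl 2).getD "") "") ++
    List.replicate 3 (PySem.Dict.getD basic_lands ((PySem.List.pyGet? cl 3).getD "") "")
  else ["Basic land selection failed."]

def select_basic_lands (color_identity : List String) : List String :=
  aBody (color_order.filter (fun c => color_identity.contains c))

-- ===== PORT B =====
def bBody (cl : List String) : List String :=
  let n := cl.length
  if 1 ≤ n ∧ n ≤ 4 then
    let base := 15 / n
    let rem := 15 % n
    (PySem.List.enumerate cl).flatMap (fun p =>
      List.replicate (base + (if p.1 < (rem : Int) then 1 else 0))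
        (PySem.Dict.getD basic_lands p.2 ""))
  else ["Basic land selection failed."]

def select_basic_lands_alt (color_identity : List String) : List String :=
  bBody (color_order.filter (fun c => color_identity.contains c))

-- ===== PRECONDITION & SPEC =====
def Spec_select_basic_lands (color_identity : List String) (out : List String) : Prop := out = select_basic_lands_alt color_identity
instance (color_identity : List String) (out : List String) : Decidable (Spec_select_basic_lands color_identity out) := by unfold Spec_select_basic_lands; infer_instance

-- ===== CLAIM (what is proved, stated in full; the proofs are below) =====
def Claim_equal_select_basic_lands : Prop := ∀ (color_identity : List String), Dom_select_basic_lands color_identity → Spec_select_basic_lands color_identity (select_basic_lands color_identity)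

-- ===== LEMMAS AND PROOFS =====

-- ===== VERDICT (by name: the statement is the Claim_ definition above) =====
-- the filtered color list is a sublist of the 5-element color_order; check all 32
theorem aBody_eq_bBody : ∀ cl ∈ color_order.sublists, aBody cl = bBody cl := by decide

theorem select_basic_lands_spec : Claim_equal_select_basic_lands := by
  intro ci _
  unfold Spec_select_basic_lands select_basic_lands select_basic_lands_alt
  exact aBody_eq_bBody _ (List.mem_sublists.2 List.filter_sublist)
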